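-- pv_equiv track=rewrite | github.com/shockdude/chart-to-sm | chart-to-sm.py | output_sm
-- ===== SOURCE A (Python) =====
-- import math
--
-- NUM_COLUMNS = 6
--
-- def measure_gcd(num_set, measure_length):
-- 	d = measure_length
-- 	for x in num_set:
-- 		d = math.gcd(d, x)
-- 		if d == 1:
-- 			return d
-- 	return d;
--
-- def output_sm(notes, last_note, measure_length, sm_diff, diff_value):
-- 	sm_notes = ''
-- 	if len(notes) > 0:
-- 		# write chart & difficulty info
-- 		sm_notes += "\n"
-- 		sm_notes += "//---------------bass-six - ----------------\n"
-- 		sm_notes += "#NOTES:\n"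
-- 		sm_notes += "     bass-six:\n"
-- 		sm_notes += "     :\n"
-- 		sm_notes += "     {}:\n".format(sm_diff) # e.g. Challenge:
-- 		sm_notes += "     {}:\n".format(diff_value)
-- 		sm_notes += "     0,0,0,0,0,0,0,0,0,0,0,0,0,0,0,0,0,0,0,0,0,0:\n" # empty groove radar
--
-- 		# add notes for each measure
-- 		for measure_start in range(0, last_note + measure_length, measure_length):
-- 			measure_end = measure_start + measure_length
-- 			valid_indexes = set()
-- 			for i in range(measure_start, measure_end):
-- 				if i in notes:
-- 					valid_indexes.add(i - measure_start)
--
-- 			# use gcd to minimize number of rows in each measure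
-- 			note_step = measure_gcd(valid_indexes, measure_length)
-- 			for i in range(measure_start, measure_end, note_step):
-- 				if i not in notes:
-- 					sm_notes += '0'*NUM_COLUMNS + '\n'
-- 				else:
-- 					for digit in notes[i]:
-- 						sm_notes += str(digit)
-- 					sm_notes += '\n'
--
-- 			if measure_start + measure_length > last_note:
-- 				sm_notes += ";\n"
-- 			else:
-- 				sm_notes += ',\n'
-- 	return sm_notes
-- ===== SOURCE B (Python) =====
-- import math
--
-- NUM_COLUMNS = 6
--
-- def output_sm(notes, last_note, measure_length, sm_diff, diff_value):
-- 	if len(notes) == 0: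
-- 		return ''
-- 	# bucket each note key by its measure once, instead of scanning every index of every measure
-- 	buckets = {}
-- 	for k in notes:
-- 		buckets.setdefault(k // measure_length, set()).add(k % measure_length)
-- 	sm_notes = ("\n"
-- 		"//---------------bass-six - ----------------\n"
-- 		"#NOTES:\n"
-- 		"     bass-six:\n"
-- 		"     :\n"
-- 		"     {}:\n"
-- 		"     {}:\n"
-- 		"     0,0,0,0,0,0,0,0,0,0,0,0,0,0,0,0,0,0,0,0,0,0:\n").format(sm_diff, diff_value)
-- 	for measure_start in range(0, last_note + measure_length, measure_length):
-- 		residues = buckets.get(measure_start // measure_length, ())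
-- 		note_step = math.gcd(measure_length, *residues)
-- 		for i in range(measure_start, measure_start + measure_length, note_step):
-- 			row = notes.get(i)
-- 			sm_notes += '0' * NUM_COLUMNS + '\n' if row is None else ''.join(map(str, row)) + '\n'
-- 		sm_notes += ';\n' if measure_start + measure_length > last_note else ',\n'
-- 	return sm_notes
-- ===== Notes on version B (the rewrite author's own statement) =====
-- stated objective: alternative
-- what changed: B buckets the note keys by measure (k // measure_length -> set of k % measure_length) in one pass over the dict, replacing A's per-measure scan of every index in [measure_start, measure_end) with a single dict lookup per measure, and computes each measure's gcd with one variadic math.gcd call instead of A's early-exit helper loop.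
-- outside the precondition, e.g. on output_sm({0: [1, 2, 3, 4, 5, 6]}, 0, 0, 'X', 1): A raises ValueError, B raises ZeroDivisionError
import Mathlib
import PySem

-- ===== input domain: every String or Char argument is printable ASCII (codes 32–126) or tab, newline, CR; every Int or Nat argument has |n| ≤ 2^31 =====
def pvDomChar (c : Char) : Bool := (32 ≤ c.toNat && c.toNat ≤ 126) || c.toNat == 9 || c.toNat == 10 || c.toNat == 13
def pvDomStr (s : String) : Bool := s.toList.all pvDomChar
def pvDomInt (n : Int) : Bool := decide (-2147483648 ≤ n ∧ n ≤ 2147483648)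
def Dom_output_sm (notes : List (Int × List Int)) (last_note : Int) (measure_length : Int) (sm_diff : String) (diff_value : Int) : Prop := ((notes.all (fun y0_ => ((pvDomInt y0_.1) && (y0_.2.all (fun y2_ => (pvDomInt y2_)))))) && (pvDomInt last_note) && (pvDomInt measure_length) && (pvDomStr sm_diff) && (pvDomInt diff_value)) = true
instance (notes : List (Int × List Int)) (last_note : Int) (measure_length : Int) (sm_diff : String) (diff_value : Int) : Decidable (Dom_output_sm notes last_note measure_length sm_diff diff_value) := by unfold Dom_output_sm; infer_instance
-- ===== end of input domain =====

-- B buckets the note keys by measure in one pass over the dict instead of scanning every index of every measure (objective: alternative; same measured cost).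

-- ===== PORT A =====
-- helper measure_gcd: folds math.gcd over the set with early return at 1
def measure_gcd_loop (d : Int) : List Int → Int
  | [] => d
  | x :: xs =>
    let d' : Int := (Int.gcd d x : Int)
    if d' = 1 then d' else measure_gcd_loop d' xs

def measure_gcd (num_set : List Int) (measure_length : Int) : Int :=
  measure_gcd_loop measure_length num_set

def output_sm (notes : List (Int × List Int)) (last_note : Int) (measure_length : Int) (sm_diff : String) (diff_value : Int) : String :=
  let sm_notes : String := ""
  if notes.length > 0 then
    let sm_notes := sm_notes ++ "\n"
    let sm_notes := sm_notes ++ "//---------------bass-six - ----------------\n"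
    let sm_notes := sm_notes ++ "#NOTES:\n"
    let sm_notes := sm_notes ++ "     bass-six:\n"
    let sm_notes := sm_notes ++ "     :\n"
    let sm_notes := sm_notes ++ "     " ++ sm_diff ++ ":\n"
    let sm_notes := sm_notes ++ "     " ++ PySem.Int.toStr diff_value ++ ":\n"
    let sm_notes := sm_notes ++ "     0,0,0,0,0,0,0,0,0,0,0,0,0,0,0,0,0,0,0,0,0,0:\n"
    (PySem.List.pyRange 0 (last_note + measure_length) measure_length).foldl
      (fun sm_notes measure_start =>
        let measure_end := measure_start + measure_length
        let valid_indexes : PySem.Set Int :=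
          (PySem.List.pyRange measure_start measure_end 1).foldl
            (fun s i => if (PySem.Dict.mk notes).contains i then PySem.Set.add s (i - measure_start) else s)
            PySem.Set.empty
        let note_step := measure_gcd valid_indexes measure_length
        let sm_notes :=
          (PySem.List.pyRange measure_start measure_end note_step).foldl
            (fun sm_notes i =>
              match (PySem.Dict.mk notes).get? i with
              | none => sm_notes ++ "000000\n"   -- '0'*NUM_COLUMNS + '\n', NUM_COLUMNS = 6
              | some row => (row.foldl (fun s digit => s ++ PySem.Int.toStr digit) sm_notes) ++ "\n")
            sm_notes
        if measure_start + measure_length > last_note then sm_notes ++ ";\n" else sm_notes ++ ",\n")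
      sm_notes
  else sm_notes

-- ===== PORT B =====
-- B-side helper: one math.gcd step (math.gcd of two ints, always nonnegative)
def pvGcdF : Int → Int → Int := fun d x => ((Int.gcd d x : Nat) : Int)

def output_sm_alt (notes : List (Int × List Int)) (last_note : Int) (measure_length : Int) (sm_diff : String) (diff_value : Int) : String :=
  if notes.length = 0 then ""
  else
    -- buckets.setdefault(k // measure_length, set()).add(k % measure_length)
    let buckets : PySem.Dict Int (PySem.Set Int) :=
      notes.foldl
        (fun b kv =>
          b.modify (PySem.Int.floordiv kv.1 measure_length) PySem.Set.empty
            (fun s => PySem.Set.add s (PySem.Int.mod kv.1 measure_length)))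
        PySem.Dict.empty
    let header : String :=
      "\n//---------------bass-six - ----------------\n#NOTES:\n     bass-six:\n     :\n     "
        ++ sm_diff ++ ":\n     " ++ PySem.Int.toStr diff_value
        ++ ":\n     0,0,0,0,0,0,0,0,0,0,0,0,0,0,0,0,0,0,0,0,0,0:\n"
    (PySem.List.pyRange 0 (last_note + measure_length) measure_length).foldl
      (fun sm_notes measure_start =>
        let residues : PySem.Set Int :=
          buckets.getD (PySem.Int.floordiv measure_start measure_length) PySem.Set.empty
        -- math.gcd(measure_length, *residues): plain gcd fold over all arguments, no early exit
        let note_step := (measure_length :: residues).foldl pvGcdF 0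
        let sm_notes :=
          (PySem.List.pyRange measure_start (measure_start + measure_length) note_step).foldl
            (fun sm_notes i =>
              match (PySem.Dict.mk notes).get? i with
              | none => sm_notes ++ "000000\n"   -- '0'*NUM_COLUMNS + '\n'
              | some row => sm_notes ++ (((row.map PySem.Int.toStr).foldl (· ++ ·) "") ++ "\n"))  -- ''.join(map(str, row))
            sm_notes
        sm_notes ++ (if measure_start + measure_length > last_note then ";\n" else ",\n"))
      header

-- ===== PRECONDITION & SPEC =====
-- Pre_ restricts to the natural domain of a positive measure length: with measure_length = 0 A raises
-- ValueError (zero range step), and a negative measure_length is outside the function's purpose (A's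
-- backwards ranges then emit accidental text that no caller could want).
def Pre_output_sm (notes : List (Int × List Int)) (last_note : Int) (measure_length : Int) (sm_diff : String) (diff_value : Int) : Prop := 1 ≤ measure_length
instance (notes : List (Int × List Int)) (last_note : Int) (measure_length : Int) (sm_diff : String) (diff_value : Int) : Decidable (Pre_output_sm notes last_note measure_length sm_diff diff_value) := by unfold Pre_output_sm; infer_instance

def pvWitness_output_sm : (List (Int × List Int)) × Int × Int × String × Int := ([(0, [1, 2, 3, 4, 5, 6]), (2, [0, 0, 2, 0, 0, 0])], 2, 4, "Challenge", 7)

def Spec_output_sm (notes : List (Int × List Int)) (last_note : Int) (measure_length : Int) (sm_diff : String) (diff_value : Int) (out : String) : Prop := out = output_sm_alt notes last_note measure_length sm_diff diff_value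
instance (notes : List (Int × List Int)) (last_note : Int) (measure_length : Int) (sm_diff : String) (diff_value : Int) (out : String) : Decidable (Spec_output_sm notes last_note measure_length sm_diff diff_value out) := by unfold Spec_output_sm; infer_instance

-- ===== CLAIM (what is proved, stated in full; the proofs are below) =====
def Claim_equal_output_sm : Prop := ∀ (notes : List (Int × List Int)) (last_note : Int) (measure_length : Int) (sm_diff : String) (diff_value : Int), Dom_output_sm notes last_note measure_length sm_diff diff_value → Pre_output_sm notes last_note measure_length sm_diff diff_value → Spec_output_sm notes last_note measure_length sm_diff diff_value (output_sm notes last_note measure_length sm_diff diff_value)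

-- ===== LEMMAS AND PROOFS =====

lemma pv_foldl_gcd_one (l : List Int) : l.foldl pvGcdF 1 = 1 := by
  induction l with
  | nil => rfl
  | cons x xs ih => simpa [pvGcdF, Int.one_gcd] using ih

-- A's early-exit gcd loop computes the plain gcd fold
lemma pv_measure_gcd_loop_eq (l : List Int) : ∀ d, measure_gcd_loop d l = l.foldl pvGcdF d := by
  induction l with
  | nil => intro d; rfl
  | cons x xs ih =>
    intro d
    by_cases h : ((Int.gcd d x : Nat) : Int) = 1
    · simp [measure_gcd_loop, h, List.foldl_cons, pvGcdF, pv_foldl_gcd_one]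
    · simp [measure_gcd_loop, h, List.foldl_cons, pvGcdF, ih]

-- the gcd fold is invariant under permutation of the list
lemma pv_foldl_gcd_perm {l₁ l₂ : List Int} (h : l₁.Perm l₂) : ∀ d, l₁.foldl pvGcdF d = l₂.foldl pvGcdF d := by
  induction h with
  | nil => intro d; rfl
  | cons x _ ih => intro d; simp [List.foldl_cons, ih]
  | swap x y l =>
    intro d
    have : pvGcdF (pvGcdF d y) x = pvGcdF (pvGcdF d x) y := by
      simp [pvGcdF, Int.gcd]
      rw [Nat.gcd_assoc, Nat.gcd_comm y.natAbs x.natAbs, ← Nat.gcd_assoc]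
    simp [List.foldl_cons, this]
  | trans _ _ ih₁ ih₂ => intro d; rw [ih₁, ih₂]

-- membership in B's bucket dict
lemma pv_bucket_mem (ml : Int) (l : List (Int × List Int)) :
    ∀ (d : PySem.Dict Int (PySem.Set Int)) (m x : Int),
      (x ∈ (l.foldl
        (fun b kv => b.modify (PySem.Int.floordiv kv.1 ml) PySem.Set.empty
          (fun s => PySem.Set.add s (PySem.Int.mod kv.1 ml))) d).getD m PySem.Set.empty) ↔
      (x ∈ d.getD m PySem.Set.empty ∨ ∃ kv ∈ l, PySem.Int.floordiv kv.1 ml = m ∧ PySem.Int.mod kv.1 ml = x) := by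
  induction l with
  | nil => intro d m x; simp
  | cons kv l ih =>
    intro d m x
    rw [List.foldl_cons, ih, PySem.Dict.getD_modify]
    by_cases hm : m = PySem.Int.floordiv kv.1 ml
    · subst hm; simp [PySem.Set.mem_add]; aesop
    · simp [hm]; aesop

-- B's buckets hold duplicate-free lists
lemma pv_bucket_nodup (ml : Int) (l : List (Int × List Int)) :
    ∀ (d : PySem.Dict Int (PySem.Set Int)), (∀ m, (d.getD m PySem.Set.empty).Nodup) →
      ∀ m, ((l.foldl
        (fun b kv => b.modify (PySem.Int.floordiv kv.1 ml) PySem.Set.empty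
          (fun s => PySem.Set.add s (PySem.Int.mod kv.1 ml))) d).getD m PySem.Set.empty).Nodup := by
  induction l with
  | nil => intro d hd m; exact hd m
  | cons kv l ih =>
    intro d hd m
    rw [List.foldl_cons]
    refine ih _ (fun m' => ?_) m
    rw [PySem.Dict.getD_modify]
    split_ifs with h
    · exact PySem.Set.nodup_add _ _ (hd _)
    · exact hd m'

-- string fold: appending from an accumulator is accumulator ++ join
lemma pv_str_foldl_append (l : List String) : ∀ s : String, l.foldl (· ++ ·) s = s ++ l.foldl (· ++ ·) "" := by
  induction l with
  | nil => intro s; simp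
  | cons x xs ih =>
    intro s
    rw [List.foldl_cons, List.foldl_cons, ih, ih (_ ++ x)]
    simp [String.append_assoc]

lemma pv_row_str (row : List Int) (s : String) :
    (row.foldl (fun s digit => s ++ PySem.Int.toStr digit) s) ++ "\n"
      = s ++ (((row.map PySem.Int.toStr).foldl (· ++ ·) "") ++ "\n") := by
  rw [← List.foldl_map (f := PySem.Int.toStr) (g := (· ++ ·)), pv_str_foldl_append]
  simp [String.append_assoc]

-- the two header builds are the same string
lemma pv_header_eq (sm_diff : String) (diff_value : Int) :
    (("" : String) ++ "\n" ++ "//---------------bass-six - ----------------\n" ++ "#NOTES:\n"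
      ++ "     bass-six:\n" ++ "     :\n" ++ "     " ++ sm_diff ++ ":\n" ++ "     "
      ++ PySem.Int.toStr diff_value ++ ":\n"
      ++ "     0,0,0,0,0,0,0,0,0,0,0,0,0,0,0,0,0,0,0,0,0,0:\n")
    = ("\n//---------------bass-six - ----------------\n#NOTES:\n     bass-six:\n     :\n     "
      ++ sm_diff ++ ":\n     " ++ PySem.Int.toStr diff_value
      ++ ":\n     0,0,0,0,0,0,0,0,0,0,0,0,0,0,0,0,0,0,0,0,0,0:\n") := by
  have h1 : (("" : String) ++ "\n" ++ "//---------------bass-six - ----------------\n" ++ "#NOTES:\n"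
      ++ "     bass-six:\n" ++ "     :\n" ++ "     ")
      = ("\n//---------------bass-six - ----------------\n#NOTES:\n     bass-six:\n     :\n     " : String) := by decide
  have h2 : ((":\n" : String) ++ "     ") = (":\n     " : String) := by decide
  rw [show (("" : String) ++ "\n" ++ "//---------------bass-six - ----------------\n" ++ "#NOTES:\n"
      ++ "     bass-six:\n" ++ "     :\n" ++ "     " ++ sm_diff ++ ":\n" ++ "     "
      ++ PySem.Int.toStr diff_value ++ ":\n"
      ++ "     0,0,0,0,0,0,0,0,0,0,0,0,0,0,0,0,0,0,0,0,0,0:\n")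
      = (("" ++ "\n" ++ "//---------------bass-six - ----------------\n" ++ "#NOTES:\n"
      ++ "     bass-six:\n" ++ "     :\n" ++ "     ") ++ sm_diff ++ ((":\n" ++ "     "))
      ++ PySem.Int.toStr diff_value ++ (":\n"
      ++ "     0,0,0,0,0,0,0,0,0,0,0,0,0,0,0,0,0,0,0,0,0,0:\n")) from by simp [String.append_assoc]]
  rw [h1, h2]
  simp [String.append_assoc]

-- ===== VERDICT (by name: the statement is the Claim_ definition above) =====
theorem output_sm_spec : Claim_equal_output_sm := by
  intro notes last_note ml sm_diff dv _hdom hpre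
  unfold Spec_output_sm output_sm output_sm_alt
  have hml : (0:Int) < ml := hpre
  cases notes with
  | nil => rfl
  | cons kv0 rest =>
    simp only [List.length_cons, Nat.succ_ne_zero, gt_iff_lt, Nat.zero_lt_succ, if_pos, ite_false]
    rw [pv_header_eq]
    refine PySem.List.foldl_congr_mem _ _ _ _ ?_
    intro acc start hmem
    have h := (PySem.List.mem_pyRange_iff_of_pos hml start).mp hmem
    obtain ⟨q, hq⟩ := h.2.2
    have e1 : q * ml = start := by rw [mul_comm]; linarith [hq]
    have e2 : (q + 1) * ml = start + ml := by rw [add_mul, one_mul, e1]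
    have hfd : PySem.Int.floordiv start ml = q := by
      rw [PySem.Int.floordiv_eq_iff_of_pos hml]
      constructor
      · linarith [e1]
      · linarith [e2]
    have hfdk : ∀ k : Int, PySem.Int.floordiv k ml = q ↔ (start ≤ k ∧ k < start + ml) := by
      intro k
      rw [PySem.Int.floordiv_eq_iff_of_pos hml]
      constructor <;> intro hh <;> exact ⟨by linarith [e1, e2, hh.1, hh.2], by linarith [e1, e2, hh.1, hh.2]⟩
    have hmdk : ∀ k : Int, start ≤ k → k < start + ml → PySem.Int.mod k ml = k - start := by
      intro k h1 h2
      have h3 := PySem.Int.floordiv_mul_add_mod k ml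
      rw [(hfdk k).mpr ⟨h1, h2⟩] at h3
      linarith [h3, e1]
    have hVA : List.foldl
        (fun s i => if ({ items := kv0 :: rest } : PySem.Dict Int (List Int)).contains i = true then PySem.Set.add s (i - start) else s)
        PySem.Set.empty (PySem.List.pyRange start (start + ml) 1)
        = PySem.Set.ofList
            (((PySem.List.pyRange start (start + ml) 1).filter
                (fun i => ({ items := kv0 :: rest } : PySem.Dict Int (List Int)).contains i)).map
              (fun i => i - start)) := by
      rw [PySem.List.foldl_if_eq_foldl_filter
            (fun i => ({ items := kv0 :: rest } : PySem.Dict Int (List Int)).contains i)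
            (fun s i => PySem.Set.add s (i - start)),
          ← PySem.Set.update_map_eq_foldl_add, PySem.Set.update_empty]
    have hmemVA : ∀ x : Int, x ∈ List.foldl
        (fun s i => if ({ items := kv0 :: rest } : PySem.Dict Int (List Int)).contains i = true then PySem.Set.add s (i - start) else s)
        PySem.Set.empty (PySem.List.pyRange start (start + ml) 1)
        ↔ ∃ kv ∈ kv0 :: rest, PySem.Int.floordiv kv.1 ml = q ∧ PySem.Int.mod kv.1 ml = x := by
      intro x
      rw [hVA]
      simp only [PySem.Set.mem_ofList, List.mem_map, List.mem_filter, PySem.List.mem_pyRange_one]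
      constructor
      · rintro ⟨i, ⟨⟨hi1, hi2⟩, hc⟩, rfl⟩
        rw [PySem.Dict.contains_iff_mem_keys, PySem.Dict.keys_mk] at hc
        obtain ⟨kv, hkv, hkv1⟩ := List.mem_map.mp hc
        exact ⟨kv, hkv, by rw [hkv1]; exact (hfdk i).mpr ⟨hi1, hi2⟩,
               by rw [hkv1]; exact hmdk i hi1 hi2⟩
      · rintro ⟨kv, hkv, hfd', hmd'⟩
        have hb := (hfdk kv.1).mp hfd'
        refine ⟨kv.1, ⟨⟨hb.1, hb.2⟩, ?_⟩, ?_⟩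
        · rw [PySem.Dict.contains_iff_mem_keys, PySem.Dict.keys_mk]
          exact List.mem_map.mpr ⟨kv, hkv, rfl⟩
        · rw [← hmd']
          exact (hmdk kv.1 hb.1 hb.2).symm
    have hmemRB : ∀ x : Int, x ∈ (List.foldl
          (fun b kv => b.modify (PySem.Int.floordiv kv.1 ml) PySem.Set.empty
            (fun s => PySem.Set.add s (PySem.Int.mod kv.1 ml)))
          PySem.Dict.empty (kv0 :: rest)).getD q PySem.Set.empty
        ↔ ∃ kv ∈ kv0 :: rest, PySem.Int.floordiv kv.1 ml = q ∧ PySem.Int.mod kv.1 ml = x := by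
      intro x
      rw [pv_bucket_mem]
      simp
    have hndVA : (List.foldl
        (fun s i => if ({ items := kv0 :: rest } : PySem.Dict Int (List Int)).contains i = true then PySem.Set.add s (i - start) else s)
        PySem.Set.empty (PySem.List.pyRange start (start + ml) 1)).Nodup := by
      rw [hVA]; exact PySem.Set.nodup_ofList _
    have hndRB : ((List.foldl
          (fun b kv => b.modify (PySem.Int.floordiv kv.1 ml) PySem.Set.empty
            (fun s => PySem.Set.add s (PySem.Int.mod kv.1 ml)))
          PySem.Dict.empty (kv0 :: rest)).getD q PySem.Set.empty).Nodup := by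
      refine pv_bucket_nodup ml (kv0 :: rest) PySem.Dict.empty (fun m => ?_) q
      simp
    have hperm := (List.perm_ext_iff_of_nodup hndVA hndRB).mpr
      (fun x => (hmemVA x).trans (hmemRB x).symm)
    have hstep : measure_gcd
        (List.foldl
          (fun s i => if ({ items := kv0 :: rest } : PySem.Dict Int (List Int)).contains i = true then PySem.Set.add s (i - start) else s)
          PySem.Set.empty (PySem.List.pyRange start (start + ml) 1)) ml
        = ((List.foldl
          (fun b kv => b.modify (PySem.Int.floordiv kv.1 ml) PySem.Set.empty
            (fun s => PySem.Set.add s (PySem.Int.mod kv.1 ml)))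
          PySem.Dict.empty (kv0 :: rest)).getD q PySem.Set.empty).foldl pvGcdF ml := by
      rw [measure_gcd, pv_measure_gcd_loop_eq, pv_foldl_gcd_perm hperm]
    have hg0 : pvGcdF 0 ml = ml := by
      simp only [pvGcdF, Int.gcd, Int.natAbs_zero, Nat.gcd_zero_left]
      omega
    have hstep' : measure_gcd
        (List.foldl
          (fun s i => if ({ items := kv0 :: rest } : PySem.Dict Int (List Int)).contains i = true then PySem.Set.add s (i - start) else s)
          PySem.Set.empty (PySem.List.pyRange start (start + ml) 1)) ml
        = (ml :: ((List.foldl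
          (fun b kv => b.modify (PySem.Int.floordiv kv.1 ml) PySem.Set.empty
            (fun s => PySem.Set.add s (PySem.Int.mod kv.1 ml)))
          PySem.Dict.empty (kv0 :: rest)).getD q PySem.Set.empty)).foldl pvGcdF 0 := by
      rw [List.foldl_cons, hg0, hstep]
    rw [hfd, hstep']
    have hrow : ∀ (ns : Int), List.foldl
        (fun sm_notes i =>
          match ({ items := kv0 :: rest } : PySem.Dict Int (List Int)).get? i with
          | none => sm_notes ++ "000000\n"
          | some row => List.foldl (fun s digit => s ++ PySem.Int.toStr digit) sm_notes row ++ "\n")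
        acc (PySem.List.pyRange start (start + ml) ns)
        = List.foldl
        (fun sm_notes i =>
          match ({ items := kv0 :: rest } : PySem.Dict Int (List Int)).get? i with
          | none => sm_notes ++ "000000\n"
          | some row => sm_notes ++ ((List.foldl (· ++ ·) "" (row.map PySem.Int.toStr)) ++ "\n"))
        acc (PySem.List.pyRange start (start + ml) ns) := by
      intro ns
      refine PySem.List.foldl_congr_mem _ _ _ _ ?_
      intro a i _
      cases hgi : ({ items := kv0 :: rest } : PySem.Dict Int (List Int)).get? i with
      | none => rfl
      | some row => exact pv_row_str row a
    split_ifs with hc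
    · rw [hrow]
    · rw [hrow]
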